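-- pv_equiv track=rewrite | github.com/guiccastro/Projeto-FRIDA | downloader.py | ListHourAndMinute
-- ===== SOURCE A (Python) =====
-- def AdjustNumberString(number_int):
--     if(number_int < 10):
--         return "0" + str(number_int)
--     else:
--         return str(number_int)
--
-- def ListHourAndMinute(list_date,b_hour,b_minute,e_hour,e_minute,frequency_hour):
--     current_hour = int(b_hour)
--     current_minute = int(b_minute)
--
--     new_date_list = []
--
--     for date in list_date[:-1]:
--         new_date = date[:]
--         new_date.append(AdjustNumberString(current_hour))
--         new_date.append(AdjustNumberString(current_minute))
--
--         new_date_list.append(new_date)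
--         new_date = date[:]
--
--         current_hour += frequency_hour
--
--         while(current_hour < 24):
--             new_date.append(AdjustNumberString(current_hour))
--             new_date.append(AdjustNumberString(current_minute))
--             new_date_list.append(new_date)
--             new_date = date[:]
--             current_hour += frequency_hour
--
--         current_hour -= 24
--
--     while(current_hour < e_hour):
--         new_date = list_date[-1][:]
--         new_date.append(AdjustNumberString(current_hour))
--         new_date.append(AdjustNumberString(current_minute))
--
--         new_date_list.append(new_date)
--
--         current_hour += frequency_hour
--
--
--     current_hour = e_hour
--
--     new_date = list_date[-1][:]
--     new_date.append(AdjustNumberString(current_hour))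
--     new_date.append(AdjustNumberString(current_minute))
--
--     new_date_list.append(new_date)
--
--     return new_date_list
-- ===== SOURCE B (Python) =====
-- def AdjustNumberString(number_int):
--     if(number_int < 10):
--         return "0" + str(number_int)
--     else:
--         return str(number_int)
--
-- def ceil_div(a, b):
--     return -((-a) // b)
--
-- def ListHourAndMinute(list_date, b_hour, b_minute, e_hour, e_minute, frequency_hour):
--     # Closed form: no while loops.  For each day the number of emitted rows is
--     # computed arithmetically (ceiling division) and the rows are generated from
--     # a range; the minute is constant throughout.
--     ms = AdjustNumberString(int(b_minute))
--     rows = []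
--     cur = int(b_hour)
--     for date in list_date[:-1]:
--         k = max(1, ceil_div(24 - cur, frequency_hour))
--         rows.extend(date + [AdjustNumberString(cur + j * frequency_hour), ms] for j in range(k))
--         cur += k * frequency_hour - 24
--     last = list_date[-1]
--     k = max(0, ceil_div(e_hour - cur, frequency_hour))
--     rows.extend(last + [AdjustNumberString(cur + j * frequency_hour), ms] for j in range(k))
--     rows.append(last + [AdjustNumberString(e_hour), ms])
--     return rows
-- ===== Notes on version B (the rewrite author's own statement) =====
-- stated objective: simpler
-- what changed: B eliminates A's while loops entirely: for each day it computes the number of rows in closed form by ceiling division and generates them from a range, with the constant minute string hoisted out; Pre_ requires a nonempty list (A raises IndexError on []) and a positive frequency_hour, since for frequency_hour <= 0 A's while loops diverge except on degenerate parameter combinations where B's ceiling-division count is meaningless (division by zero, or a spurious count for a negative step).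
-- outside the precondition, e.g. on ListHourAndMinute([['d']], 5, 0, 3, 0, 0): A returns [['d', '03', '00']], B raises ZeroDivisionError
import Mathlib
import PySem

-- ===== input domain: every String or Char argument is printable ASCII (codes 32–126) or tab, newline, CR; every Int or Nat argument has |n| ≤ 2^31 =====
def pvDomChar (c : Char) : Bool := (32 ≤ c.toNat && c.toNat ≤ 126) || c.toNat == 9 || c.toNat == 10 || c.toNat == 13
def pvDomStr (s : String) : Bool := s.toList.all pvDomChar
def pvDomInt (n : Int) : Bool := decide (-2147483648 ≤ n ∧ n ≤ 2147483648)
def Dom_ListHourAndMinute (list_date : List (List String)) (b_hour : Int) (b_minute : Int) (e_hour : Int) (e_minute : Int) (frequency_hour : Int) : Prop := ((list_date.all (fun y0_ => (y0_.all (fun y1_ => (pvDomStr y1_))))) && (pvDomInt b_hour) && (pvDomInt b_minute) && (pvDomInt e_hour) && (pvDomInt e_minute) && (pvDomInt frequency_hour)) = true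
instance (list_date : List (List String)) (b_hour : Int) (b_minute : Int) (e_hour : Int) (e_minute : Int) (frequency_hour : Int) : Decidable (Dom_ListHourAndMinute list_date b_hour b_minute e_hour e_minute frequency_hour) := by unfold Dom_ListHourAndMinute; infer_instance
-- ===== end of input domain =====

-- ===== PORT A =====
-- B replaces A's while loops by closed-form row counts (ceiling division) and range generation; objective: simpler.
-- helper AdjustNumberString, shared by both Python modules
def pvAdj (number_int : Int) : String :=
  if number_int < 10 then "0" ++ PySem.Int.toStr number_int else PySem.Int.toStr number_int

-- inner 'while current_hour < 24' of A; fuel makes the loop total (enough fuel inside Pre_)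
def pvAinner : Nat → List String → Int → Int → Int → List (List String) → List (List String) × Int
  | 0, _, _, _, cur, acc => (acc, cur)
  | fuel+1, date, minute, freq, cur, acc =>
    if cur < 24 then
      pvAinner fuel date minute freq (cur + freq) (acc ++ [date ++ [pvAdj cur, pvAdj minute]])
    else (acc, cur)

-- 'for date in list_date[:-1]'
def pvAouter : List (List String) → Int → Int → Int → List (List String) → List (List String) × Int
  | [], _, _, cur, acc => (acc, cur)
  | date :: rest, minute, freq, cur, acc =>
    let acc1 := acc ++ [date ++ [pvAdj cur, pvAdj minute]]
    let cur1 := cur + freq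
    let p := pvAinner (24 - cur1).toNat date minute freq cur1 acc1
    pvAouter rest minute freq (p.2 - 24) p.1

-- final 'while current_hour < e_hour'
def pvAfinal : Nat → List String → Int → Int → Int → Int → List (List String) → List (List String)
  | 0, _, _, _, _, _, acc => acc
  | fuel+1, last, minute, freq, eh, cur, acc =>
    if cur < eh then
      pvAfinal fuel last minute freq eh (cur + freq) (acc ++ [last ++ [pvAdj cur, pvAdj minute]])
    else acc

def ListHourAndMinute (list_date : List (List String)) (b_hour : Int) (b_minute : Int) (e_hour : Int) (e_minute : Int) (frequency_hour : Int) : List (List String) :=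
  let last := (PySem.List.pyGet? list_date (-1)).getD []   -- list_date[-1]; IndexError (empty list) excluded by Pre_
  let p := pvAouter (PySem.List.slice list_date none (some (-1))) b_minute frequency_hour b_hour []
  let acc := pvAfinal (e_hour - p.2).toNat last b_minute frequency_hour e_hour p.2 p.1
  acc ++ [last ++ [pvAdj e_hour, pvAdj b_minute]]

-- ===== PORT B =====
-- ceil_div(a, b) = -((-a) // b)
def pvCeil (a b : Int) : Int := -(PySem.Int.floordiv (-a) b)

-- 'for date in list_date[:-1]' of B: k rows per date computed in closed form, emitted from a range
def pvBdates : List (List String) → String → Int → Int → List (List String) → List (List String) × Int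
  | [], _, _, cur, acc => (acc, cur)
  | date :: rest, ms, f, cur, acc =>
    let k := max 1 (pvCeil (24 - cur) f)
    pvBdates rest ms f (cur + k * f - 24)
      (acc ++ (PySem.List.pyRange 0 k 1).map (fun j => date ++ [pvAdj (cur + j * f), ms]))

def ListHourAndMinute_alt (list_date : List (List String)) (b_hour : Int) (b_minute : Int) (e_hour : Int) (e_minute : Int) (frequency_hour : Int) : List (List String) :=
  let ms := pvAdj b_minute
  let p := pvBdates (PySem.List.slice list_date none (some (-1))) ms frequency_hour b_hour []
  let last := (PySem.List.pyGet? list_date (-1)).getD []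
  let k2 := max 0 (pvCeil (e_hour - p.2) frequency_hour)
  (p.1 ++ (PySem.List.pyRange 0 k2 1).map (fun j => last ++ [pvAdj (p.2 + j * frequency_hour), ms]))
    ++ [last ++ [pvAdj e_hour, ms]]

-- ===== PRECONDITION & SPEC =====
-- Pre_ excludes the empty list (A raises IndexError on list_date[-1]) and nonpositive frequency_hour:
-- there A's while loops diverge except on degenerate parameter combinations, on which B's
-- ceiling-division count is meaningless (ZeroDivisionError for 0, a spurious count for negative steps).
def Pre_ListHourAndMinute (list_date : List (List String)) (b_hour : Int) (b_minute : Int) (e_hour : Int) (e_minute : Int) (frequency_hour : Int) : Prop :=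
  list_date ≠ [] ∧ 1 ≤ frequency_hour
instance (list_date : List (List String)) (b_hour : Int) (b_minute : Int) (e_hour : Int) (e_minute : Int) (frequency_hour : Int) : Decidable (Pre_ListHourAndMinute list_date b_hour b_minute e_hour e_minute frequency_hour) := by unfold Pre_ListHourAndMinute; infer_instance

def pvWitness_ListHourAndMinute : List (List String) × Int × Int × Int × Int × Int :=
  ([["2024", "01", "01"], ["2024", "01", "02"]], 8, 30, 12, 0, 6)

def Spec_ListHourAndMinute (list_date : List (List String)) (b_hour : Int) (b_minute : Int) (e_hour : Int) (e_minute : Int) (frequency_hour : Int) (out : List (List String)) : Prop := out = ListHourAndMinute_alt list_date b_hour b_minute e_hour e_minute frequency_hour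
instance (list_date : List (List String)) (b_hour : Int) (b_minute : Int) (e_hour : Int) (e_minute : Int) (frequency_hour : Int) (out : List (List String)) : Decidable (Spec_ListHourAndMinute list_date b_hour b_minute e_hour e_minute frequency_hour out) := by unfold Spec_ListHourAndMinute; infer_instance

-- ===== CLAIM (what is proved, stated in full; the proofs are below) =====
def Claim_equal_ListHourAndMinute : Prop := ∀ (list_date : List (List String)) (b_hour : Int) (b_minute : Int) (e_hour : Int) (e_minute : Int) (frequency_hour : Int), Dom_ListHourAndMinute list_date b_hour b_minute e_hour e_minute frequency_hour → Pre_ListHourAndMinute list_date b_hour b_minute e_hour e_minute frequency_hour → Spec_ListHourAndMinute list_date b_hour b_minute e_hour e_minute frequency_hour (ListHourAndMinute list_date b_hour b_minute e_hour e_minute frequency_hour)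

-- ===== LEMMAS AND PROOFS =====
theorem pvWitness_ok :
    Dom_ListHourAndMinute (pvWitness_ListHourAndMinute.1) (pvWitness_ListHourAndMinute.2.1) (pvWitness_ListHourAndMinute.2.2.1) (pvWitness_ListHourAndMinute.2.2.2.1) (pvWitness_ListHourAndMinute.2.2.2.2.1) (pvWitness_ListHourAndMinute.2.2.2.2.2) ∧
    Pre_ListHourAndMinute (pvWitness_ListHourAndMinute.1) (pvWitness_ListHourAndMinute.2.1) (pvWitness_ListHourAndMinute.2.2.1) (pvWitness_ListHourAndMinute.2.2.2.1) (pvWitness_ListHourAndMinute.2.2.2.2.1) (pvWitness_ListHourAndMinute.2.2.2.2.2) := by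
  constructor <;> decide

-- ceiling-division bracket: (c-1)*f < x ≤ c*f for c = pvCeil x f
theorem pvCeil_char (x f : Int) (hf : 0 < f) :
    (pvCeil x f - 1) * f < x ∧ x ≤ pvCeil x f * f := by
  have h := (PySem.Int.neg_floordiv_neg_eq_iff_of_pos (a := x) (b := f) (q := pvCeil x f) hf).mp rfl
  exact h

theorem pvCeil_nonpos (x f : Int) (hf : 0 < f) (hx : x ≤ 0) : pvCeil x f ≤ 0 := by
  rcases pvCeil_char x f hf with ⟨h1, _⟩
  by_contra h
  push_neg at h
  nlinarith

theorem pvCeil_pos (x f : Int) (hf : 0 < f) (hx : 0 < x) : 1 ≤ pvCeil x f := by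
  rcases pvCeil_char x f hf with ⟨_, h2⟩
  by_contra h
  push_neg at h
  nlinarith

theorem pvCeil_sub (x f : Int) (hf : 0 < f) : pvCeil (x - f) f = pvCeil x f - 1 := by
  rcases pvCeil_char x f hf with ⟨h1, h2⟩
  apply (PySem.Int.neg_floordiv_neg_eq_iff_of_pos (a := x - f) (b := f) (q := pvCeil x f - 1) hf).mpr
  constructor <;> nlinarith

-- shifting a range-generated block by one step
theorem pvRange_map_shift {α : Type} (g : Int → α) (c : Nat) (cur f : Int) :
    (List.range (c+1)).map (fun (j : Nat) => g (cur + (j : Int) * f))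
      = g cur :: (List.range c).map (fun (j : Nat) => g (cur + f + (j : Int) * f)) := by
  rw [List.range_succ_eq_map, List.map_cons, List.map_map]
  simp only [List.cons.injEq]
  constructor
  · norm_num
  · apply List.map_congr_left
    intro a _
    simp only [Function.comp]
    congr 1
    push_cast
    ring

-- A's inner while loop computes a closed-form block of rows
theorem pvAinner_char (date : List String) (m f : Int) (hf : 0 < f) :
    ∀ (fuel : Nat) (cur : Int) (acc : List (List String)), 24 - cur ≤ (fuel : Int) →
      pvAinner fuel date m f cur acc
        = (acc ++ (List.range (max 0 (pvCeil (24 - cur) f)).toNat).map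
              (fun (j : Nat) => date ++ [pvAdj (cur + (j : Int) * f), pvAdj m]),
           cur + (max 0 (pvCeil (24 - cur) f)) * f) := by
  intro fuel
  induction fuel with
  | zero =>
    intro cur acc hfuel
    have hx : (24 : Int) - cur ≤ 0 := by exact_mod_cast hfuel
    have hc := pvCeil_nonpos (24 - cur) f hf hx
    have hm : max 0 (pvCeil (24 - cur) f) = 0 := by omega
    simp [pvAinner, hm]
  | succ fuel ih =>
    intro cur acc hfuel
    by_cases h : cur < 24
    · have hx : (0 : Int) < 24 - cur := by omega
      have hc1 := pvCeil_pos (24 - cur) f hf hx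
      have hstep : pvCeil (24 - (cur + f)) f = pvCeil (24 - cur) f - 1 := by
        have := pvCeil_sub (24 - cur) f hf
        rw [← this]; congr 1; ring
      have hrec := ih (cur + f) (acc ++ [date ++ [pvAdj cur, pvAdj m]])
        (by omega)
      simp only [pvAinner, if_pos h, hrec, hstep]
      have hm1 : max 0 (pvCeil (24 - cur) f - 1) = pvCeil (24 - cur) f - 1 := by omega
      have hm2 : max 0 (pvCeil (24 - cur) f) = pvCeil (24 - cur) f := by omega
      rw [hm1, hm2]
      simp only [Prod.mk.injEq]
      constructor
      · have hnat : (pvCeil (24 - cur) f).toNat = (pvCeil (24 - cur) f - 1).toNat + 1 := by omega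
        rw [hnat, pvRange_map_shift (fun h => date ++ [pvAdj h, pvAdj m])]
        simp
      · ring
    · have hx : (24 : Int) - cur ≤ 0 := by omega
      have hc := pvCeil_nonpos (24 - cur) f hf hx
      have hm : max 0 (pvCeil (24 - cur) f) = 0 := by omega
      simp [pvAinner, if_neg h, hm]

-- B's per-date block of rows equals A's first row plus A's inner loop, and the day ends at the same hour
theorem pvBdates_eq (m f : Int) (hf : 0 < f) :
    ∀ (l : List (List String)) (cur : Int) (acc : List (List String)),
      pvBdates l (pvAdj m) f cur acc = pvAouter l m f cur acc := by
  intro l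
  induction l with
  | nil => intro cur acc; rfl
  | cons date rest ih =>
    intro cur acc
    simp only [pvBdates, pvAouter]
    have hfuel : (24 : Int) - (cur + f) ≤ ((24 - (cur + f)).toNat : Int) := Int.self_le_toNat _
    rw [pvAinner_char date m f hf _ (cur + f) _ hfuel]
    have hstep : pvCeil (24 - (cur + f)) f = pvCeil (24 - cur) f - 1 := by
      have := pvCeil_sub (24 - cur) f hf
      rw [← this]; congr 1; ring
    have hnat : ((max 1 (pvCeil (24 - cur) f) - 0)).toNat
        = (max 0 (pvCeil (24 - (cur + f)) f)).toNat + 1 := by rw [hstep]; omega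
    have hlist :
        (PySem.List.pyRange 0 (max 1 (pvCeil (24 - cur) f)) 1).map
            (fun j => date ++ [pvAdj (cur + j * f), pvAdj m])
          = (date ++ [pvAdj cur, pvAdj m]) ::
              (List.range (max 0 (pvCeil (24 - (cur + f)) f)).toNat).map
                (fun (j : Nat) => date ++ [pvAdj (cur + f + (j : Int) * f), pvAdj m]) := by
      rw [PySem.List.pyRange_one, List.map_map, hnat]
      have hcomp :
          (List.range ((max 0 (pvCeil (24 - (cur + f)) f)).toNat + 1)).map
              ((fun j => date ++ [pvAdj (cur + j * f), pvAdj m]) ∘ (fun (k : Nat) => (0 : Int) + (k : Int)))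
            = (List.range ((max 0 (pvCeil (24 - (cur + f)) f)).toNat + 1)).map
                (fun (j : Nat) => date ++ [pvAdj (cur + (j : Int) * f), pvAdj m]) := by
        apply List.map_congr_left
        intro a _
        simp
      rw [hcomp, pvRange_map_shift (fun h => date ++ [pvAdj h, pvAdj m])]
    rw [hlist]
    have hend : cur + max 1 (pvCeil (24 - cur) f) * f - 24
        = cur + f + max 0 (pvCeil (24 - (cur + f)) f) * f - 24 := by
      have hk : max 1 (pvCeil (24 - cur) f) = max 0 (pvCeil (24 - (cur + f)) f) + 1 := by
        rw [hstep]; omega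
      rw [hk]; ring
    rw [hend, ih]
    simp

-- A's final while loop computes a closed-form block of rows
theorem pvAfinal_char (last : List String) (m f eh : Int) (hf : 0 < f) :
    ∀ (fuel : Nat) (cur : Int) (acc : List (List String)), eh - cur ≤ (fuel : Int) →
      pvAfinal fuel last m f eh cur acc
        = acc ++ (List.range (max 0 (pvCeil (eh - cur) f)).toNat).map
            (fun (j : Nat) => last ++ [pvAdj (cur + (j : Int) * f), pvAdj m]) := by
  intro fuel
  induction fuel with
  | zero =>
    intro cur acc hfuel
    have hx : eh - cur ≤ 0 := by exact_mod_cast hfuel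
    have hc := pvCeil_nonpos (eh - cur) f hf hx
    have hm : max 0 (pvCeil (eh - cur) f) = 0 := by omega
    simp [pvAfinal, hm]
  | succ fuel ih =>
    intro cur acc hfuel
    by_cases h : cur < eh
    · have hx : (0 : Int) < eh - cur := by omega
      have hc1 := pvCeil_pos (eh - cur) f hf hx
      have hstep : pvCeil (eh - (cur + f)) f = pvCeil (eh - cur) f - 1 := by
        have := pvCeil_sub (eh - cur) f hf
        rw [← this]; congr 1; ring
      have hrec := ih (cur + f) (acc ++ [last ++ [pvAdj cur, pvAdj m]])
        (by omega)
      simp only [pvAfinal, if_pos h, hrec, hstep]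
      have hm1 : max 0 (pvCeil (eh - cur) f - 1) = pvCeil (eh - cur) f - 1 := by omega
      have hm2 : max 0 (pvCeil (eh - cur) f) = pvCeil (eh - cur) f := by omega
      rw [hm1, hm2]
      have hnat : (pvCeil (eh - cur) f).toNat = (pvCeil (eh - cur) f - 1).toNat + 1 := by omega
      rw [hnat, pvRange_map_shift (fun h => last ++ [pvAdj h, pvAdj m])]
      simp
    · have hx : eh - cur ≤ 0 := by omega
      have hc := pvCeil_nonpos (eh - cur) f hf hx
      have hm : max 0 (pvCeil (eh - cur) f) = 0 := by omega
      simp [pvAfinal, if_neg h, hm]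

-- ===== VERDICT (by name: the statement is the Claim_ definition above) =====
theorem ListHourAndMinute_spec : Claim_equal_ListHourAndMinute := by
  intro list_date b_hour b_minute e_hour e_minute frequency_hour _ hpre
  obtain ⟨_, hf⟩ := hpre
  show ListHourAndMinute list_date b_hour b_minute e_hour e_minute frequency_hour
      = ListHourAndMinute_alt list_date b_hour b_minute e_hour e_minute frequency_hour
  simp only [ListHourAndMinute, ListHourAndMinute_alt]
  rw [pvBdates_eq b_minute frequency_hour (by omega)]
  set p := pvAouter (PySem.List.slice list_date none (some (-1))) b_minute frequency_hour b_hour [] with hp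
  have hfuel : e_hour - p.2 ≤ (((e_hour - p.2).toNat : Nat) : Int) := Int.self_le_toNat _
  rw [pvAfinal_char _ b_minute frequency_hour e_hour (by omega) _ p.2 p.1 hfuel]
  rw [PySem.List.pyRange_one, List.map_map, sub_zero]
  simp only [List.append_assoc]
  congr 1
  congr 1
  apply List.map_congr_left
  intro a _
  simp
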